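-- pv_equiv track=rewrite | github.com/aorursy/old-nb | trgosselin14_characterizing-horror-stories-by-author.py | count_punc_in_tokens
-- ===== SOURCE A (Python) =====
-- import string
--
-- def count_punc_in_tokens(series):
--
--     counts = []
--
--     for s in series:
--
--         counter = 0
--
--         for i in s:
--
--             if i in punc_list[0]:
--
--                 counter += 1
--
--         counts.append(counter)
--
--     return counts
--
-- punc_list = [string.punctuation]
-- ===== SOURCE B (Python) =====
-- import string
--
-- def count_punc_in_tokens(series):
--     # Idiomatic re-implementation: per string build a character histogram
--     # (Counter-style dict), then sum the counts of the punctuation alphabet.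
--     counts = []
--     for s in series:
--         freq = {}
--         for ch in s:
--             freq[ch] = freq.get(ch, 0) + 1
--         counts.append(sum(freq.get(p, 0) for p in string.punctuation))
--     return counts
-- ===== Notes on version B (the rewrite author's own statement) =====
-- stated objective: alternative
-- what changed: B builds a per-string character histogram (dict) and then sums the histogram entries over the fixed punctuation alphabet, instead of A's single membership-test scan accumulating a counter.
import Mathlib
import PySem

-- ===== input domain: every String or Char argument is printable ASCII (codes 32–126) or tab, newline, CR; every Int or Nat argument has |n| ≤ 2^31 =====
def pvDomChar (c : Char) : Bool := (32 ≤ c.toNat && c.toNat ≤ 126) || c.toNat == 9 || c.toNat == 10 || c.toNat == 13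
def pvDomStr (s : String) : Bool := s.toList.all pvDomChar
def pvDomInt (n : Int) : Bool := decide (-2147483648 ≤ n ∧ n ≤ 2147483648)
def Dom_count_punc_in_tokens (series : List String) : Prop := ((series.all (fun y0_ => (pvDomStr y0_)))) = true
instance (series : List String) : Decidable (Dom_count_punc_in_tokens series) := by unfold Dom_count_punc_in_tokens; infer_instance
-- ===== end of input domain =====

-- B replaces A's per-character membership scan with a histogram (dict) per string
-- summed over the punctuation alphabet; same results, alternative data structure.

-- string.punctuation (shared constant; A reads it through punc_list[0])
def puncChars : List Char := "!\"#$%&'()*+,-./:;<=>?@[\\]^_`{|}~".toList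

-- ===== PORT A =====
-- punc_list = [string.punctuation]; 'i in punc_list[0]' for a single char i is char membership
def count_punc_in_tokens (series : List String) : List Int :=
  series.foldl
    (fun counts s =>
      counts ++ [s.toList.foldl (fun counter i => if puncChars.contains i then counter + 1 else counter) (0 : Int)])
    []

-- ===== PORT B =====
def count_punc_in_tokens_alt (series : List String) : List Int :=
  series.foldl
    (fun counts s =>
      let freq := s.toList.foldl (fun d ch => d.insert ch (d.getD ch 0 + 1)) (PySem.Dict.empty : PySem.Dict Char Int)
      counts ++ [(puncChars.map (fun p => freq.getD p 0)).sum])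
    []

-- ===== PRECONDITION & SPEC =====
def Spec_count_punc_in_tokens (series : List String) (out : List Int) : Prop := out = count_punc_in_tokens_alt series
instance (series : List String) (out : List Int) : Decidable (Spec_count_punc_in_tokens series out) := by unfold Spec_count_punc_in_tokens; infer_instance

-- ===== CLAIM (what is proved, stated in full; the proofs are below) =====
def Claim_equal_count_punc_in_tokens : Prop := ∀ (series : List String), Dom_count_punc_in_tokens series → Spec_count_punc_in_tokens series (count_punc_in_tokens series)

-- ===== LEMMAS AND PROOFS =====

-- A's inner loop as a sum of per-character indicators
lemma a_fold_eq_sum (cs : List Char) (c : Int) :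
    cs.foldl (fun counter i => if puncChars.contains i then counter + 1 else counter) c
      = c + (cs.map (fun i => if puncChars.contains i then (1 : Int) else 0)).sum := by
  induction cs generalizing c with
  | nil => simp
  | cons a cs ih => simp only [List.foldl_cons, List.map_cons, List.sum_cons, ih]; split <;> ring

-- indicator sum over a duplicate-free alphabet is membership
lemma sum_ind (a : Char) (ps : List Char) (h : ps.Nodup) :
    (ps.map (fun p => if p == a then (1 : Int) else 0)).sum = if ps.contains a then 1 else 0 := by
  induction ps with
  | nil => simp
  | cons p ps ih =>
    rcases List.nodup_cons.mp h with ⟨hp, hps⟩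
    simp only [List.map_cons, List.sum_cons, List.contains_cons, ih hps]
    by_cases hpa : p = a
    · subst hpa
      have hc : ps.contains p = false := by simp [List.contains_eq_mem, hp]
      simpa using hp
    · have h1 : (p == a) = false := by simp [hpa]
      have h2 : (a == p) = false := by simp [Ne.symm hpa]
      simp [h1, h2]

-- B's histogram sum equals the same indicator sum
lemma b_sum_eq_sum (cs : List Char) :
    (puncChars.map (fun p => (cs.count p : Int))).sum
      = (cs.map (fun i => if puncChars.contains i then (1 : Int) else 0)).sum := by
  induction cs with
  | nil => simp
  | cons a cs ih =>
    have hstep : (puncChars.map (fun p => (((a :: cs).count p : Int)))).sum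
        = (puncChars.map (fun p => ((cs.count p : Int) + if p == a then (1 : Int) else 0))).sum := by
      apply congrArg
      apply List.map_congr_left
      intro p _
      rw [List.count_cons]
      by_cases hpa : p = a
      · subst hpa; simp
      · have h1 : (a == p) = false := by simp [Ne.symm hpa]
        have h2 : (p == a) = false := by simp [hpa]
        simp [h1, h2]
    rw [hstep]
    have hsplit : (puncChars.map (fun p => ((cs.count p : Int) + if p == a then (1 : Int) else 0))).sum
        = (puncChars.map (fun p => (cs.count p : Int))).sum
          + (puncChars.map (fun p => if p == a then (1 : Int) else 0)).sum := by
      induction puncChars with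
      | nil => simp
      | cons q qs ihq => simp only [List.map_cons, List.sum_cons, ihq]; ring
    rw [hsplit, ih, sum_ind a puncChars (by decide)]
    simp [add_comm]

lemma per_string (s : String) :
    (puncChars.map (fun p =>
        ((s.toList.foldl (fun d ch => d.insert ch (d.getD ch 0 + 1)) (PySem.Dict.empty : PySem.Dict Char Int)).getD p 0))).sum
      = s.toList.foldl (fun counter i => if puncChars.contains i then counter + 1 else counter) (0 : Int) := by
  have h : ∀ p : Char,
      ((s.toList.foldl (fun d ch => d.insert ch (d.getD ch 0 + 1)) (PySem.Dict.empty : PySem.Dict Char Int)).getD p 0)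
        = (s.toList.count p : Int) := by
    intro p
    rw [PySem.Dict.getD_foldl_insert_add_one]
    simp
  rw [List.map_congr_left (fun p _ => h p), b_sum_eq_sum, a_fold_eq_sum]
  simp

-- ===== VERDICT (by name: the statement is the Claim_ definition above) =====
theorem count_punc_in_tokens_spec : Claim_equal_count_punc_in_tokens := by
  intro series _
  unfold Spec_count_punc_in_tokens count_punc_in_tokens count_punc_in_tokens_alt
  induction series using List.reverseRecOn with
  | nil => rfl
  | append_singleton xs x _ =>
    simp only [List.foldl_append, List.foldl_cons, List.foldl_nil, per_string]
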